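-- pv_equiv track=rewrite | github.com/anger-man/unsupervised-image-transfer-and-uq | source_onesided.py | calculate_respective_field
-- ===== SOURCE A (Python) =====
-- def calculate_respective_field(S,F):
--     r=1
--     for l in range(1,len(S)+1,1):
--         s=1
--         i=1
--         while i<l:
--             s*=S[i-1]
--             i+=1
--         r+=(F[l-1]-1)*s
--     return r
-- ===== SOURCE B (Python) =====
-- def calculate_respective_field(S, F):
--     r = 1
--     p = 1
--     for l in range(len(S)):
--         r += (F[l] - 1) * p
--         p *= S[l]
--     return r
-- ===== Notes on version B (the rewrite author's own statement) =====
-- stated objective: faster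
-- what changed: Replaced the O(n^2) nested loop (which recomputes the stride product from scratch for every layer) with a single pass that maintains a running prefix product of the strides.
import Mathlib
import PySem

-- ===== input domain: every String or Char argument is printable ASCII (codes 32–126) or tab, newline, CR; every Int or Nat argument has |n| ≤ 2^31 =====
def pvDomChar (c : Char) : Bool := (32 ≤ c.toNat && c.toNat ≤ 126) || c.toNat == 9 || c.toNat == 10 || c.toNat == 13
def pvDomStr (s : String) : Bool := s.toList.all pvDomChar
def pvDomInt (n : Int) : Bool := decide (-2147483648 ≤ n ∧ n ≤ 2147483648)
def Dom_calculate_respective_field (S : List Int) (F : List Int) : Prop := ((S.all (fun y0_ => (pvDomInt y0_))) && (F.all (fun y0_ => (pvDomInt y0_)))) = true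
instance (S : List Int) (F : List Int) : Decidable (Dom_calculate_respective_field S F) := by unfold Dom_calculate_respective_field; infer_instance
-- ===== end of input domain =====

-- B replaces A's quadratic nested loop by one pass with a running prefix product (objective: faster).

-- ===== PORT A =====
-- the inner 'while i < l: s *= S[i-1]; i += 1' loop, step for step
def pvWhileA (S : List Int) (l : Int) (s : Int) (i : Int) : Int :=
  if i < l then pvWhileA S l (s * PySem.List.pyGetD S (i - 1) 0) (i + 1) else s
termination_by (l - i).toNat
decreasing_by omega

-- pyGetD is exact here: inside Pre_ every index A reads is in range
def calculate_respective_field (S : List Int) (F : List Int) : Int :=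
  (PySem.List.pyRange 1 ((S.length : Int) + 1) 1).foldl
    (fun r l => r + (PySem.List.pyGetD F (l - 1) 0 - 1) * pvWhileA S l 1 1) 1

-- ===== PORT B =====
-- pyGetD is exact here: inside Pre_ every index B reads is in range
def calculate_respective_field_alt (S : List Int) (F : List Int) : Int :=
  ((PySem.List.pyRange 0 (S.length : Int) 1).foldl
    (fun (rp : Int × Int) l =>
      (rp.1 + (PySem.List.pyGetD F l 0 - 1) * rp.2, rp.2 * PySem.List.pyGetD S l 0))
    (1, 1)).1

-- ===== PRECONDITION & SPEC =====
-- A (and B) raise IndexError on F[l] once l reaches len(F) < len(S); Pre_ excludes exactly those inputs.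
def Pre_calculate_respective_field (S : List Int) (F : List Int) : Prop := S.length ≤ F.length
instance (S : List Int) (F : List Int) : Decidable (Pre_calculate_respective_field S F) := by unfold Pre_calculate_respective_field; infer_instance
def pvWitness_calculate_respective_field : List Int × List Int := ([2, 2, 1], [3, 3, 5])

def Spec_calculate_respective_field (S : List Int) (F : List Int) (out : Int) : Prop := out = calculate_respective_field_alt S F
instance (S : List Int) (F : List Int) (out : Int) : Decidable (Spec_calculate_respective_field S F out) := by unfold Spec_calculate_respective_field; infer_instance

-- ===== CLAIM (what is proved, stated in full; the proofs are below) =====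
def Claim_equal_calculate_respective_field : Prop := ∀ (S : List Int) (F : List Int), Dom_calculate_respective_field S F → Pre_calculate_respective_field S F → Spec_calculate_respective_field S F (calculate_respective_field S F)

-- ===== LEMMAS AND PROOFS =====

-- A's inner while loop computes s times the product of S[i-1..i-1+n-1]
theorem pvWhileA_prod (S : List Int) :
    ∀ (n : Nat) (i s : Int), 1 ≤ i → i.toNat - 1 + n ≤ S.length →
      pvWhileA S (i + n) s i = s * ((S.drop (i.toNat - 1)).take n).prod := by
  intro n
  induction n with
  | zero =>
      intro i s _ _
      rw [pvWhileA]
      simp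
  | succ n ih =>
      intro i s hi hlen
      rw [pvWhileA]
      have hlt : i < i + (n + 1 : Nat) := by push_cast; omega
      rw [if_pos hlt]
      have : i + ((n : Int) + 1) = (i + 1) + n := by ring
      push_cast
      rw [this]
      have h1 : (1 : Int) ≤ i + 1 := by omega
      have h2 : (i + 1).toNat - 1 + n ≤ S.length := by omega
      have := ih (i + 1) (s * PySem.List.pyGetD S (i - 1) 0) h1 h2
      push_cast at this
      rw [this]
      have hidx : i.toNat - 1 < S.length := by omega
      have hget : PySem.List.pyGetD S (i - 1) 0 = S[i.toNat - 1] := by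
        rw [PySem.List.pyGetD_eq_getElem S 0 (by omega : (0:Int) ≤ i - 1)
          (by omega : i - 1 < (S.length : Int))]
        congr 1
        omega
      have hdrop : S.drop (i.toNat - 1) = S[i.toNat - 1] :: S.drop (i.toNat - 1 + 1) :=
        (List.getElem_cons_drop hidx).symm
      have hsucc : (i + 1).toNat - 1 = i.toNat - 1 + 1 := by omega
      rw [hget, hsucc, hdrop, List.take_succ_cons, List.prod_cons]
      ring

-- both folds, truncated to the first n layers, agree; B's pair carries the prefix product
theorem loops_agree (S F : List Int) :
    ∀ (n : Nat), n ≤ S.length →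
      (PySem.List.pyRange 1 ((n : Int) + 1) 1).foldl
          (fun r l => r + (PySem.List.pyGetD F (l - 1) 0 - 1) * pvWhileA S l 1 1) 1
        = ((PySem.List.pyRange 0 (n : Int) 1).foldl
            (fun (rp : Int × Int) l =>
              (rp.1 + (PySem.List.pyGetD F l 0 - 1) * rp.2, rp.2 * PySem.List.pyGetD S l 0))
            (1, 1)).1
      ∧ ((PySem.List.pyRange 0 (n : Int) 1).foldl
            (fun (rp : Int × Int) l =>
              (rp.1 + (PySem.List.pyGetD F l 0 - 1) * rp.2, rp.2 * PySem.List.pyGetD S l 0))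
            (1, 1)).2 = (S.take n).prod := by
  intro n
  induction n with
  | zero =>
      intro _
      simp only [Nat.cast_zero, zero_add]
      rw [PySem.List.pyRange_one_eq_nil (le_refl (1:Int)),
        PySem.List.pyRange_one_eq_nil (le_refl (0:Int))]
      simp
  | succ n ih =>
      intro hn
      have hn' : n ≤ S.length := by omega
      obtain ⟨ih1, ih2⟩ := ih hn'
      have hA : PySem.List.pyRange 1 (((n + 1 : Nat) : Int) + 1)
          = PySem.List.pyRange 1 ((n : Int) + 1) ++ [(n : Int) + 1] := by
        push_cast
        exact PySem.List.pyRange_one_succ_right (by omega)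
      have hB : PySem.List.pyRange 0 ((n + 1 : Nat) : Int)
          = PySem.List.pyRange 0 (n : Int) ++ [(n : Int)] := by
        push_cast
        exact PySem.List.pyRange_one_succ_right (by omega)
      rw [hA, hB, List.foldl_append, List.foldl_append, List.foldl_cons, List.foldl_nil,
        List.foldl_cons, List.foldl_nil]
      have hb : n < S.length := by omega
      have hW : pvWhileA S ((n : Int) + 1) 1 1 = (S.take n).prod := by
        have h := pvWhileA_prod S n 1 1 le_rfl (by simpa using hn')
        simpa [add_comm] using h
      have hSn : PySem.List.pyGetD S (n : Int) 0 = S[n] := by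
        rw [PySem.List.pyGetD_eq_getElem S 0 (by omega : (0:Int) ≤ (n : Int))
          (by exact_mod_cast hb)]
        simp
      have htake : (S.take (n + 1)).prod = (S.take n).prod * S[n] :=
        List.prod_take_succ S n hb
      constructor
      · simp only [add_sub_cancel_right]
        rw [ih1, hW, ih2]
      · simp only
        rw [ih2, hSn, htake]

-- ===== VERDICT (by name: the statement is the Claim_ definition above) =====
theorem calculate_respective_field_spec : Claim_equal_calculate_respective_field := by
  intro S F _ hpre
  unfold Spec_calculate_respective_field calculate_respective_field calculate_respective_field_alt
  exact (loops_agree S F S.length le_rfl).1
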